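-- pv_equiv track=rewrite | github.com/willismonroe/adventofcode | 2017/day16/day16_part1.py | solve
-- ===== SOURCE A (Python) =====
-- def spin(programs, size):
--     return programs[-size:] + programs[:-size]
--
-- def exchange(programs, a, b):
--     p_list = programs[:]
--     p_list[a], p_list[b] = p_list[b], p_list[a]
--     return p_list
--
-- def partner(programs, a, b):
--     return exchange(programs, programs.index(a), programs.index(b))
--
-- def solve(input):
--     programs = ['a', 'b', 'c', 'd', 'e', 'f', 'g', 'h', 'i', 'j', 'k', 'l', 'm', 'n', 'o', 'p']
--     for move in input:
--         if move[0] == 's':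
--             programs = spin(programs, int(move[1:]))
--         elif move[0] == 'x':
--             programs = exchange(programs, int(move[1:].split('/')[0]), int(move[1:].split('/')[1]))
--         elif move[0] == 'p':
--             programs = partner(programs, move[1:].split('/')[0], move[1:].split('/')[1])
--
--     return ''.join(programs)
-- ===== SOURCE B (Python) =====
-- def solve(input):
--     base = ['a', 'b', 'c', 'd', 'e', 'f', 'g', 'h',
--             'i', 'j', 'k', 'l', 'm', 'n', 'o', 'p']
--     # Positional moves (s/x) act on a position permutation `perm`; the
--     # value-relabel move (p) composes a swap onto the substitution `subst`.
--     # The two commute, so the concrete list is only materialised once at the end.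
--     perm = list(range(16))
--     subst = {c: c for c in base}
--     for move in input:
--         if move[0] == 's':
--             n = int(move[1:])
--             perm = perm[-n:] + perm[:-n]
--         elif move[0] == 'x':
--             parts = move[1:].split('/')
--             i, j = int(parts[0]), int(parts[1])
--             perm[i], perm[j] = perm[j], perm[i]
--         elif move[0] == 'p':
--             parts = move[1:].split('/')
--             a, b = parts[0], parts[1]
--             subst = {k: (b if v == a else a if v == b else v)
--                      for k, v in subst.items()}
--     return ''.join(subst[base[i]] for i in perm)
-- ===== Notes on version B (the rewrite author's own statement) =====
-- stated objective: alternative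
-- what changed: B never rewrites the concrete 16-program list per move: it composes all positional moves (s/x) into one position-permutation array and all partner moves (p) into one value-substitution dict, exploiting that the two kinds commute, and materialises the program string once at the end.
import Mathlib
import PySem

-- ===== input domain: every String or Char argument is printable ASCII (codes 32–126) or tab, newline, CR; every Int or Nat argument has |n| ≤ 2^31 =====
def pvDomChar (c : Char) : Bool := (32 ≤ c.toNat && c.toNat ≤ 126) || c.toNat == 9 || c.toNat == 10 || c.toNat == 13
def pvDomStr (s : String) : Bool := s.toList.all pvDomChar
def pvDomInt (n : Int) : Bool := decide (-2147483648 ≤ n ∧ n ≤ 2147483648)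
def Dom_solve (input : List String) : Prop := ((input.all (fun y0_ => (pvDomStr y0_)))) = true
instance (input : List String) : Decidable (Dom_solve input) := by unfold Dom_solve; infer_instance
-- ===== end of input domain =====

-- B replays the dance as a composed position-permutation plus a value-substitution dict,
-- materialising the concrete program list only once at the end (objective: alternative, same cost).

-- ===== PORT A =====
def baseA : List String :=
  ["a", "b", "c", "d", "e", "f", "g", "h", "i", "j", "k", "l", "m", "n", "o", "p"]

-- programs[-size:] + programs[:-size]
def spinA (programs : List String) (size : Int) : List String :=
  PySem.List.slice programs (some (-size)) none ++ PySem.List.slice programs none (some (-size))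

-- p_list[a], p_list[b] = p_list[b], p_list[a]  (none = IndexError)
def exchangeA (programs : List String) (a b : Int) : Option (List String) :=
  match PySem.List.pyGet? programs b, PySem.List.pyGet? programs a with
  | some vb, some va =>
      match PySem.List.pySet? programs a vb with
      | some l1 => PySem.List.pySet? l1 b va
      | none => none
  | _, _ => none

-- exchange(programs, programs.index(a), programs.index(b))  (none = ValueError)
def partnerA (programs : List String) (a b : String) : Option (List String) :=
  match PySem.List.index? programs a, PySem.List.index? programs b with
  | some ia, some ib => exchangeA programs (ia : Int) (ib : Int)
  | _, _ => none

-- one loop iteration of A; none = any exception raised so far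
def stepA (st : Option (List String)) (move : String) : Option (List String) :=
  match st with
  | none => none
  | some programs =>
    match PySem.Str.pyGet? move 0 with
    | none => none
    | some c =>
      if c = 's' then
        match PySem.Int.ofStr? (PySem.Str.slice move (some 1) none) with
        | some n => some (spinA programs n)
        | none => none
      else if c = 'x' then
        match PySem.Str.split? (PySem.Str.slice move (some 1) none) "/" with
        | some parts =>
          match PySem.List.pyGet? parts 0, PySem.List.pyGet? parts 1 with
          | some s0, some s1 =>
            match PySem.Int.ofStr? s0, PySem.Int.ofStr? s1 with
            | some a, some b => exchangeA programs a b
            | _, _ => none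
          | _, _ => none
        | none => none
      else if c = 'p' then
        match PySem.Str.split? (PySem.Str.slice move (some 1) none) "/" with
        | some parts =>
          match PySem.List.pyGet? parts 0, PySem.List.pyGet? parts 1 with
          | some a, some b => partnerA programs a b
          | _, _ => none
        | none => none
      else some programs

def solve (input : List String) : String :=
  match input.foldl stepA (some baseA) with
  | some programs => PySem.Str.join "" programs
  | none => ""

-- ===== PORT B =====
def baseB : List String :=
  ["a", "b", "c", "d", "e", "f", "g", "h", "i", "j", "k", "l", "m", "n", "o", "p"]

-- b if v == a else a if v == b else v
def swapVal (a b v : String) : String := if v = a then b else if v = b then a else v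

-- one loop iteration of B over (perm, subst); none = any exception raised so far
def stepB (st : Option (List Int × PySem.Dict String String)) (move : String) :
    Option (List Int × PySem.Dict String String) :=
  match st with
  | none => none
  | some (perm, subst) =>
    match PySem.Str.pyGet? move 0 with
    | none => none
    | some c =>
      if c = 's' then
        match PySem.Int.ofStr? (PySem.Str.slice move (some 1) none) with
        | some n =>
            some (PySem.List.slice perm (some (-n)) none ++ PySem.List.slice perm none (some (-n)),
                  subst)
        | none => none
      else if c = 'x' then
        match PySem.Str.split? (PySem.Str.slice move (some 1) none) "/" with
        | some parts =>
          match PySem.List.pyGet? parts 0, PySem.List.pyGet? parts 1 with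
          | some s0, some s1 =>
            match PySem.Int.ofStr? s0, PySem.Int.ofStr? s1 with
            | some i, some j =>
              -- perm[i], perm[j] = perm[j], perm[i]
              match PySem.List.pyGet? perm j, PySem.List.pyGet? perm i with
              | some vj, some vi =>
                match PySem.List.pySet? perm i vj with
                | some p1 =>
                  match PySem.List.pySet? p1 j vi with
                  | some p2 => some (p2, subst)
                  | none => none
                | none => none
              | _, _ => none
            | _, _ => none
          | _, _ => none
        | none => none
      else if c = 'p' then
        match PySem.Str.split? (PySem.Str.slice move (some 1) none) "/" with
        | some parts =>
          match PySem.List.pyGet? parts 0, PySem.List.pyGet? parts 1 with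
          | some a, some b =>
              -- subst = {k: (b if v==a else a if v==b else v) for k, v in subst.items()}
              some (perm, PySem.Dict.ofList (subst.items.map (fun kv => (kv.1, swapVal a b kv.2))))
          | _, _ => none
        | none => none
      else some (perm, subst)

-- ''.join(subst[base[i]] for i in perm); the defaults of getD are never reached: perm's
-- entries are always indices 0..15 and subst's keys are always exactly the 16 letters.
def solve_alt (input : List String) : String :=
  match input.foldl stepB
      (some (PySem.List.pyRange 0 16 1, PySem.Dict.ofList (baseB.map (fun c => (c, c))))) with
  | some (perm, subst) =>
      PySem.Str.join "" (perm.map (fun i => (subst.get? (PySem.List.pyGetD baseB i "")).getD ""))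
  | none => ""

-- ===== PRECONDITION & SPEC =====
def pvLetters : List String :=
  ["a", "b", "c", "d", "e", "f", "g", "h", "i", "j", "k", "l", "m", "n", "o", "p"]

def pvIdxOk (s? : Option String) : Bool :=
  match s? with
  | none => false
  | some s =>
    match PySem.Int.ofStr? s with
    | some i => decide (-16 ≤ i ∧ i < 16)
    | none => false

def pvLetterOk (s? : Option String) : Bool :=
  match s? with
  | none => false
  | some s => pvLetters.contains s

-- a move on which A returns normally: nonempty; 's' + a parseable int; 'x' + two parseable
-- in-range indices separated by '/'; 'p' + two programs out of a..p separated by '/'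
def pvMoveOk (move : String) : Bool :=
  match PySem.Str.pyGet? move 0 with
  | none => false
  | some c =>
    if c = 's' then (PySem.Int.ofStr? (PySem.Str.slice move (some 1) none)).isSome
    else if c = 'x' then
      match PySem.Str.split? (PySem.Str.slice move (some 1) none) "/" with
      | some parts => pvIdxOk (PySem.List.pyGet? parts 0) && pvIdxOk (PySem.List.pyGet? parts 1)
      | none => false
    else if c = 'p' then
      match PySem.Str.split? (PySem.Str.slice move (some 1) none) "/" with
      | some parts =>
          pvLetterOk (PySem.List.pyGet? parts 0) && pvLetterOk (PySem.List.pyGet? parts 1)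
      | none => false
    else true

-- exactly the inputs on which the Python A returns (every other input raises
-- IndexError/ValueError while parsing a move or looking a program up)
def Pre_solve (input : List String) : Prop := input.all pvMoveOk = true
instance (input : List String) : Decidable (Pre_solve input) := by unfold Pre_solve; infer_instance

def pvWitness_solve : List String := ["s3", "x13/4", "pe/b", "s-2", "x-1/0", "pp/a", "zzz"]

def Spec_solve (input : List String) (out : String) : Prop := out = solve_alt input
instance (input : List String) (out : String) : Decidable (Spec_solve input out) := by
  unfold Spec_solve; infer_instance

-- ===== CLAIM (what is proved, stated in full; the proofs are below) =====
def Claim_equal_solve : Prop :=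
  ∀ (input : List String), Dom_solve input → Pre_solve input → Spec_solve input (solve input)

-- ===== LEMMAS AND PROOFS =====

-- value ending up at position i of the dance B describes
def fB (subst : PySem.Dict String String) (i : Int) : String :=
  (subst.get? (PySem.List.pyGetD baseB i "")).getD ""

-- simulation relation between A's program list and B's (perm, subst)
def SimRel (P : List String) (st : List Int × PySem.Dict String String) : Prop :=
  P = st.1.map (fB st.2) ∧ st.1.Perm (PySem.List.pyRange 0 16 1) ∧
  st.2.keys = baseB ∧ st.2.values.Perm baseB

theorem slice_map {α β : Type} (f : α → β) (l : List α) (a? b? : Option Int) :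
    PySem.List.slice (l.map f) a? b? = (PySem.List.slice l a? b?).map f := by
  cases a? <;> cases b? <;>
    simp [PySem.List.slice, List.map_drop, List.map_take]

theorem slice_none_some {α : Type} (xs : List α) (b : Int) :
    PySem.List.slice xs none (some b) = xs.take (PySem.List.clampIdx xs.length b) := by
  simp [PySem.List.slice]

theorem spin_perm {α : Type} (l : List α) (s : Int) :
    (PySem.List.slice l (some s) none ++ PySem.List.slice l none (some s)).Perm l := by
  rw [PySem.List.slice_some_none, slice_none_some]
  exact List.perm_append_comm.trans (by rw [List.take_append_drop])

theorem pyGet?_map {α β : Type} (f : α → β) (l : List α) (i : Int) :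
    PySem.List.pyGet? (l.map f) i = (PySem.List.pyGet? l i).map f := by
  unfold PySem.List.pyGet?
  rw [List.length_map]
  cases PySem.List.pyIdx? l.length i <;> simp

theorem pySet?_map {α β : Type} (f : α → β) (l : List α) (i : Int) (v : α) :
    PySem.List.pySet? (l.map f) i (f v) = (PySem.List.pySet? l i v).map (List.map f) := by
  unfold PySem.List.pySet?
  rw [List.length_map]
  cases PySem.List.pyIdx? l.length i <;> simp [List.map_set]

theorem pySet?_length {α : Type} {l m : List α} {i : Int} {v : α}
    (h : PySem.List.pySet? l i v = some m) : m.length = l.length := by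
  unfold PySem.List.pySet? at h
  cases hk : PySem.List.pyIdx? l.length i <;> rw [hk] at h <;> simp at h
  rw [← h]; simp

theorem pySwap_perm {α : Type} {l : List α} {i j : Int} {vi vj : α} {p1 p2 : List α}
    (hgj : PySem.List.pyGet? l j = some vj) (hgi : PySem.List.pyGet? l i = some vi)
    (hs1 : PySem.List.pySet? l i vj = some p1) (hs2 : PySem.List.pySet? p1 j vi = some p2) :
    p2.Perm l := by
  unfold PySem.List.pyGet? at hgj hgi
  unfold PySem.List.pySet? at hs1 hs2
  have hl1 : p1.length = l.length := by
    cases hk : PySem.List.pyIdx? l.length i <;> rw [hk] at hs1 <;> simp at hs1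
    rw [← hs1]; simp
  rw [hl1] at hs2
  cases hki : PySem.List.pyIdx? l.length i with
  | none => rw [hki] at hs1; simp at hs1
  | some ki =>
    rw [hki] at hs1 hgi; simp at hs1 hgi
    cases hkj : PySem.List.pyIdx? l.length j with
    | none => rw [hkj] at hs2; simp at hs2
    | some kj =>
      rw [hkj] at hs2 hgj; simp at hs2 hgj
      obtain ⟨hki', hvi⟩ := List.getElem?_eq_some_iff.mp hgi
      obtain ⟨hkj', hvj⟩ := List.getElem?_eq_some_iff.mp hgj
      rw [← hs2, ← hs1, ← hvi, ← hvj]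
      exact List.set_set_perm hki' hkj'

theorem map_swapVal_eq_set_set (l : List String) (hnd : l.Nodup) (a b : String)
    (ha : a ∈ l) (hb : b ∈ l) :
    l.map (swapVal a b) =
      (l.set (l.idxOf a) (l[l.idxOf b]'(List.idxOf_lt_length_of_mem hb))).set (l.idxOf b)
        (l[l.idxOf a]'(List.idxOf_lt_length_of_mem ha)) := by
  apply List.ext_getElem (by simp)
  intro j hj hj'
  have hlen : j < l.length := by simpa using hj
  have hja : l[l.idxOf a]'(List.idxOf_lt_length_of_mem ha) = a := List.getElem_idxOf _
  have hjb : l[l.idxOf b]'(List.idxOf_lt_length_of_mem hb) = b := List.getElem_idxOf _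
  have haj : (l.idxOf a = j) ↔ l[j] = a := by
    constructor
    · intro h; subst h; exact List.getElem_idxOf _
    · intro h; rw [← h]; exact List.Nodup.idxOf_getElem hnd j hlen
  have hbj : (l.idxOf b = j) ↔ l[j] = b := by
    constructor
    · intro h; subst h; exact List.getElem_idxOf _
    · intro h; rw [← h]; exact List.Nodup.idxOf_getElem hnd j hlen
  simp only [List.getElem_set, List.getElem_map, swapVal, hja, hjb]
  split_ifs <;> simp_all

theorem swapVal_perm (l : List String) (hl : l.Perm baseB) (a b : String)
    (ha : a ∈ baseB) (hb : b ∈ baseB) : (l.map (swapVal a b)).Perm baseB := by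
  have hnd : l.Nodup := hl.nodup_iff.mpr (by decide)
  have ha' : a ∈ l := hl.mem_iff.mpr ha
  have hb' : b ∈ l := hl.mem_iff.mpr hb
  rw [map_swapVal_eq_set_set l hnd a b ha' hb']
  exact (List.set_set_perm _ _).trans hl

theorem index?_of_mem {P : List String} {a : String} (ha : a ∈ P) :
    PySem.List.index? P a = some (P.idxOf a) := by
  rw [PySem.List.index?_eq_idxOf?]
  cases h : List.idxOf? a P with
  | none => rw [List.idxOf?_eq_none_iff] at h; exact absurd ha h
  | some k => rw [List.idxOf_eq_getD_idxOf?, h]; rfl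

theorem partnerA_eq (P : List String) (hnd : P.Nodup) (a b : String)
    (ha : a ∈ P) (hb : b ∈ P) : partnerA P a b = some (P.map (swapVal a b)) := by
  have hia : P.idxOf a < P.length := List.idxOf_lt_length_of_mem ha
  have hib : P.idxOf b < P.length := List.idxOf_lt_length_of_mem hb
  unfold partnerA
  rw [index?_of_mem ha, index?_of_mem hb]
  simp only []
  unfold exchangeA
  rw [PySem.List.pyGet?_natCast, PySem.List.pyGet?_natCast,
    List.getElem?_eq_getElem hib, List.getElem?_eq_getElem hia]
  simp only []
  rw [PySem.List.pySet?_natCast (h := hia)]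
  simp only []
  have hib' : P.idxOf b < (P.set (P.idxOf a) P[P.idxOf b]).length := by simpa using hib
  rw [PySem.List.pySet?_natCast (h := hib')]
  rw [map_swapVal_eq_set_set P hnd a b ha hb]

theorem map_fB_pyRange (subst : PySem.Dict String String) :
    (PySem.List.pyRange 0 16 1).map (fB subst)
      = baseB.map (fun c => (subst.get? c).getD "") := by
  have h16 : (16 : Int) = PySem.List.len baseB := by decide
  have h1 : (PySem.List.pyRange 0 16 1).map (fun i => PySem.List.pyGetD baseB i "")
      = baseB := by
    rw [h16, PySem.List.map_pyGetD_pyRange_zero]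
  calc (PySem.List.pyRange 0 16 1).map (fB subst)
      = ((PySem.List.pyRange 0 16 1).map (fun i => PySem.List.pyGetD baseB i "")).map
          (fun c => (subst.get? c).getD "") := by rw [List.map_map]; rfl
    _ = baseB.map (fun c => (subst.get? c).getD "") := by rw [h1]

theorem values_eq (subst : PySem.Dict String String) (hk : subst.keys = baseB) :
    subst.values = baseB.map (fun c => (subst.get? c).getD "") := by
  have hnd : subst.keys.Nodup := by rw [hk]; decide
  have h := PySem.Dict.values_eq_map_keys subst hnd ""
  rw [hk] at h
  rw [h]
  apply List.map_congr_left
  intro c _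
  exact PySem.Dict.getD_eq_get?_getD _ _ _

theorem dict_mapValues_items (subst : PySem.Dict String String) (hk : subst.keys = baseB)
    (g : String → String) :
    (PySem.Dict.ofList (subst.items.map (fun kv => (kv.1, g kv.2)))).items
      = subst.items.map (fun kv => (kv.1, g kv.2)) := by
  have hnd : ((subst.items.map (fun kv => (kv.1, g kv.2))).map (fun p => p.1)).Nodup := by
    have h1 : (subst.items.map (fun kv => (kv.1, g kv.2))).map (fun p => p.1)
        = subst.items.map (fun p => p.1) := by
      simp [List.map_map, Function.comp]
    have h2 : subst.items.map (fun p => p.1) = subst.keys := rfl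
    rw [h1, h2, hk]; decide
  have h := PySem.Dict.items_foldl_insert_fresh
      (l := subst.items.map (fun kv => (kv.1, g kv.2)))
      (k := fun p => p.1) (v := fun p => p.2) (d := PySem.Dict.empty)
      (by intro p hp; simp [PySem.Dict.contains_empty]) hnd
  simpa [PySem.Dict.ofList, PySem.Dict.update] using h

theorem dict_mapValues_get? (subst : PySem.Dict String String) (hk : subst.keys = baseB)
    (g : String → String) (k : String) :
    (PySem.Dict.ofList (subst.items.map (fun kv => (kv.1, g kv.2)))).get? k
      = (subst.get? k).map g := by
  simp only [PySem.Dict.get?, dict_mapValues_items subst hk g]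
  rw [List.find?_map]
  have hcomp : ((fun p : String × String => p.1 == k) ∘
      (fun kv : String × String => (kv.1, g kv.2))) = fun p : String × String => p.1 == k := by
    funext p; rfl
  rw [hcomp]
  cases subst.items.find? (fun p : String × String => p.1 == k) <;> simp

theorem dict_mapValues_keys (subst : PySem.Dict String String) (hk : subst.keys = baseB)
    (g : String → String) :
    (PySem.Dict.ofList (subst.items.map (fun kv => (kv.1, g kv.2)))).keys = baseB := by
  have h1 : (PySem.Dict.ofList (subst.items.map (fun kv => (kv.1, g kv.2)))).keys
      = (subst.items.map (fun kv => (kv.1, g kv.2))).map (fun p => p.1) := by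
    simp [PySem.Dict.keys, dict_mapValues_items subst hk g]
  rw [h1, List.map_map]
  have h2 : ((fun p : String × String => p.1) ∘ (fun kv : String × String => (kv.1, g kv.2)))
      = fun p : String × String => p.1 := by funext p; rfl
  rw [h2]; exact hk

theorem dict_mapValues_values (subst : PySem.Dict String String) (hk : subst.keys = baseB)
    (g : String → String) :
    (PySem.Dict.ofList (subst.items.map (fun kv => (kv.1, g kv.2)))).values
      = subst.values.map g := by
  simp [PySem.Dict.values, dict_mapValues_items subst hk g, List.map_map, Function.comp]

theorem fB_mapValues (subst : PySem.Dict String String) (hk : subst.keys = baseB)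
    (g : String → String) (i : Int) (h0 : 0 ≤ i) (h16 : i < 16) :
    fB (PySem.Dict.ofList (subst.items.map (fun kv => (kv.1, g kv.2)))) i
      = g (fB subst i) := by
  have hin : PySem.Raise.InRange baseB.length i := by
    unfold PySem.Raise.InRange
    constructor <;> simp [baseB] <;> omega
  have hmem : PySem.List.pyGetD baseB i "" ∈ baseB := PySem.List.pyGetD_mem baseB "" hin
  have hsome : subst.get? (PySem.List.pyGetD baseB i "") ≠ none := by
    intro hnone
    rw [PySem.Dict.get?_eq_none_iff_not_mem_keys] at hnone
    rw [hk] at hnone; exact hnone hmem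
  obtain ⟨v, hv⟩ := Option.ne_none_iff_exists'.mp hsome
  simp [fB, dict_mapValues_get? subst hk g, hv]

theorem step_rel (move : String) (hm : pvMoveOk move = true) (P : List String)
    (perm : List Int) (subst : PySem.Dict String String) (h : SimRel P (perm, subst)) :
    ∃ P' st', stepA (some P) move = some P' ∧ stepB (some (perm, subst)) move = some st' ∧
      SimRel P' st' := by
  obtain ⟨hP, hperm, hkeys, hvals⟩ := h
  dsimp only at hP hperm hkeys hvals
  have hlen16 : perm.length = 16 := by
    have := hperm.length_eq; simpa using this
  have hmemperm : ∀ i ∈ perm, 0 ≤ i ∧ i < 16 := by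
    intro i hi
    have := hperm.mem_iff.mp hi
    exact (PySem.List.mem_pyRange_one).mp this
  have hPbase : P.Perm baseB := by
    rw [hP]
    refine (hperm.map (fB subst)).trans ?_
    rw [map_fB_pyRange subst, ← values_eq subst hkeys]
    exact hvals
  unfold pvMoveOk at hm
  cases hc : PySem.Str.pyGet? move 0 with
  | none => rw [hc] at hm; simp at hm
  | some c =>
    rw [hc] at hm
    dsimp only at hm
    by_cases hs : c = 's'
    · rw [if_pos hs] at hm
      cases hn : PySem.Int.ofStr? (PySem.Str.slice move (some 1) none) with
      | none => rw [hn] at hm; simp at hm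
      | some n =>
        have eA : stepA (some P) move = some (spinA P n) := by
          simp only [stepA, hc, hn, if_pos hs]
        have eB : stepB (some (perm, subst)) move =
            some (PySem.List.slice perm (some (-n)) none ++
              PySem.List.slice perm none (some (-n)), subst) := by
          simp only [stepB, hc, hn, if_pos hs]
        refine ⟨_, _, eA, eB, ?_, ?_, hkeys, hvals⟩
        · show spinA P n = _
          unfold spinA
          rw [hP, slice_map, slice_map, ← List.map_append]
        · exact (spin_perm perm (-n)).trans hperm
    · rw [if_neg hs] at hm
      by_cases hx : c = 'x'
      · rw [if_pos hx] at hm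
        cases hsp : PySem.Str.split? (PySem.Str.slice move (some 1) none) "/" with
        | none => rw [hsp] at hm; simp at hm
        | some parts =>
          rw [hsp] at hm
          dsimp only at hm
          cases h0 : PySem.List.pyGet? parts 0 with
          | none => rw [h0] at hm; simp [pvIdxOk] at hm
          | some s0 =>
            cases h1 : PySem.List.pyGet? parts 1 with
            | none => rw [h0, h1] at hm; simp [pvIdxOk] at hm
            | some s1 =>
              rw [h0, h1] at hm
              simp only [Bool.and_eq_true, pvIdxOk] at hm
              obtain ⟨hm0, hm1⟩ := hm
              cases hi : PySem.Int.ofStr? s0 with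
              | none => rw [hi] at hm0; simp at hm0
              | some i =>
                cases hj : PySem.Int.ofStr? s1 with
                | none => rw [hj] at hm1; simp at hm1
                | some j =>
                  rw [hi] at hm0; rw [hj] at hm1
                  simp only [decide_eq_true_eq] at hm0 hm1
                  have hini : PySem.Raise.InRange perm.length i := by
                    unfold PySem.Raise.InRange; rw [hlen16]
                    exact ⟨by exact_mod_cast hm0.1, by exact_mod_cast hm0.2⟩
                  have hinj : PySem.Raise.InRange perm.length j := by
                    unfold PySem.Raise.InRange; rw [hlen16]
                    exact ⟨by exact_mod_cast hm1.1, by exact_mod_cast hm1.2⟩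
                  obtain ⟨vj, hvj⟩ := Option.ne_none_iff_exists'.mp
                    (fun hn => ((PySem.List.pyGet?_eq_none_iff perm j).mp hn) hinj)
                  obtain ⟨vi, hvi⟩ := Option.ne_none_iff_exists'.mp
                    (fun hn => ((PySem.List.pyGet?_eq_none_iff perm i).mp hn) hini)
                  obtain ⟨p1, hp1⟩ := Option.ne_none_iff_exists'.mp
                    (fun hn => ((PySem.List.pySet?_eq_none_iff perm i vj).mp hn) hini)
                  have hinj1 : PySem.Raise.InRange p1.length j := by
                    rw [pySet?_length hp1]; exact hinj
                  obtain ⟨p2, hp2⟩ := Option.ne_none_iff_exists'.mp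
                    (fun hn => ((PySem.List.pySet?_eq_none_iff p1 j vi).mp hn) hinj1)
                  have eA : stepA (some P) move = some (p2.map (fB subst)) := by
                    simp only [stepA, hc, hsp, h0, h1, hi, hj, if_neg hs, if_pos hx]
                    unfold exchangeA
                    rw [hP, pyGet?_map, pyGet?_map, hvj, hvi]
                    simp only [Option.map_some]
                    rw [pySet?_map, hp1]
                    simp only [Option.map_some]
                    rw [pySet?_map, hp2]
                    simp
                  have eB : stepB (some (perm, subst)) move = some (p2, subst) := by
                    simp only [stepB, hc, hsp, h0, h1, hi, hj, if_neg hs, if_pos hx,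
                      hvj, hvi, hp1, hp2]
                  refine ⟨_, _, eA, eB, rfl, ?_, hkeys, hvals⟩
                  exact (pySwap_perm hvj hvi hp1 hp2).trans hperm
      · rw [if_neg hx] at hm
        by_cases hp' : c = 'p'
        · rw [if_pos hp'] at hm
          cases hsp : PySem.Str.split? (PySem.Str.slice move (some 1) none) "/" with
          | none => rw [hsp] at hm; simp at hm
          | some parts =>
            rw [hsp] at hm
            dsimp only at hm
            cases h0 : PySem.List.pyGet? parts 0 with
            | none => rw [h0] at hm; simp [pvLetterOk] at hm
            | some a =>
              cases h1 : PySem.List.pyGet? parts 1 with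
              | none => rw [h0, h1] at hm; simp [pvLetterOk] at hm
              | some b =>
                rw [h0, h1] at hm
                simp only [Bool.and_eq_true, pvLetterOk, List.contains_eq_mem,
                  decide_eq_true_eq] at hm
                have hlb : pvLetters = baseB := rfl
                rw [hlb] at hm
                obtain ⟨hma, hmb⟩ := hm
                have hnd : P.Nodup := hPbase.nodup_iff.mpr (by decide)
                have hmain : partnerA P a b = some (P.map (swapVal a b)) :=
                  partnerA_eq P hnd a b (hPbase.mem_iff.mpr hma) (hPbase.mem_iff.mpr hmb)
                have eA : stepA (some P) move = some (P.map (swapVal a b)) := by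
                  simp only [stepA, hc, hsp, h0, h1, if_neg hs, if_neg hx, if_pos hp']
                  exact hmain
                have eB : stepB (some (perm, subst)) move =
                    some (perm, PySem.Dict.ofList
                      (subst.items.map (fun kv => (kv.1, swapVal a b kv.2)))) := by
                  simp only [stepB, hc, hsp, h0, h1, if_neg hs, if_neg hx, if_pos hp']
                refine ⟨_, _, eA, eB, ?_, hperm, dict_mapValues_keys subst hkeys _, ?_⟩
                · rw [hP, List.map_map]
                  apply List.map_congr_left
                  intro i hi
                  obtain ⟨hi0, hi16⟩ := hmemperm i hi
                  exact (fB_mapValues subst hkeys (swapVal a b) i hi0 hi16).symm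
                · rw [dict_mapValues_values subst hkeys]
                  exact swapVal_perm _ hvals a b hma hmb
        · rw [if_neg hp'] at hm
          have eA : stepA (some P) move = some P := by
            simp only [stepA, hc, if_neg hs, if_neg hx, if_neg hp']
          have eB : stepB (some (perm, subst)) move = some (perm, subst) := by
            simp only [stepB, hc, if_neg hs, if_neg hx, if_neg hp']
          exact ⟨P, (perm, subst), eA, eB, hP, hperm, hkeys, hvals⟩

theorem fold_rel (moves : List String) (hm : ∀ m ∈ moves, pvMoveOk m = true)
    (P : List String) (perm : List Int) (subst : PySem.Dict String String)
    (h : SimRel P (perm, subst)) :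
    ∃ P' st', moves.foldl stepA (some P) = some P' ∧
      moves.foldl stepB (some (perm, subst)) = some st' ∧ SimRel P' st' := by
  induction moves generalizing P perm subst with
  | nil => exact ⟨P, (perm, subst), rfl, rfl, h⟩
  | cons m ms ih =>
    obtain ⟨P', ⟨perm', subst'⟩, e1, e2, h'⟩ :=
      step_rel m (hm m (by simp)) P perm subst h
    obtain ⟨P'', st'', f1, f2, h''⟩ :=
      ih (fun x hx => hm x (by simp [hx])) P' perm' subst' h'
    refine ⟨P'', st'', ?_, ?_, h''⟩
    · rw [List.foldl_cons, e1]; exact f1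
    · rw [List.foldl_cons, e2]; exact f2

-- ===== VERDICT (by name: the statement is the Claim_ definition above) =====
theorem solve_spec : Claim_equal_solve := by
  unfold Claim_equal_solve
  intro input _ hpre
  unfold Spec_solve solve solve_alt
  have hinit : SimRel baseA
      (PySem.List.pyRange 0 16 1, PySem.Dict.ofList (baseB.map (fun c => (c, c)))) := by
    refine ⟨?_, ?_, ?_, ?_⟩ <;> decide
  obtain ⟨P', ⟨perm', subst'⟩, e1, e2, hrel⟩ :=
    fold_rel input (List.all_eq_true.mp hpre) baseA _ _ hinit
  rw [e1, e2, hrel.1]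
  rfl
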